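-- pv_equiv track=rewrite | github.com/aignas/project_euler | src/solution521.py | series_index
-- ===== SOURCE A (Python) =====
-- def series_index(prime, start, end):
--     """A generator index in the series of number generated by the 6k ± 1 form.
--
--     for the prime 5 it will do the indiceses of the numbers:
--         25, 35, 55, 65, etc
--     which are:
--         7, 10, 17,
--
--     """
--     if start < prime**2:
--         start = prime**2
--     else:
--         start = (start // prime + 1) * prime
--
--         if start % 2 == 0:
--             start += prime
--
--         if start % 3 == 0:
--             start += 2 * prime
--
--     # Calculate the skip value
--     skip = (start + 2 * prime) % 3 == 0
--
--     end = end // prime * prime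
--     if end %2 == 0:
--         end -= prime
--
--     if end %3 == 0:
--         end -= 2 * prime
--
--     # Calculate the value needed during the iteration
--     big = prime + (prime + 1)// 6 * 2
--     small = prime - (prime + 1)// 6 * 2
--     stop = end //2 - (end //3 - end // 6) - 1
--     index = start // 2 - (start // 3 - start // 6) - 1
--
--     while index <= stop:
--         yield index
--         index += big if skip else small
--         skip = not skip
-- ===== SOURCE B (Python) =====
-- def series_index(prime, start, end):
--     # Closed form: count the yielded terms by division, then emit each index
--     # directly from its position (no incremental accumulator / skip toggling).
--     if start < prime**2:
--         start = prime**2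
--     else:
--         start = (start // prime + 1) * prime
--         if start % 2 == 0:
--             start += prime
--         if start % 3 == 0:
--             start += 2 * prime
--     skip = (start + 2 * prime) % 3 == 0
--     end = end // prime * prime
--     if end % 2 == 0:
--         end -= prime
--     if end % 3 == 0:
--         end -= 2 * prime
--     g = (prime + 1) // 6 * 2
--     first = prime + g if skip else prime - g
--     stop = end // 2 - (end // 3 - end // 6) - 1
--     index0 = start // 2 - (start // 3 - start // 6) - 1
--     if index0 > stop:
--         return
--     n = (stop - index0) // (2 * prime) + 1
--     if stop - index0 >= first:
--         n += (stop - index0 - first) // (2 * prime) + 1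
--     for j in range(n):
--         yield index0 + j // 2 * (2 * prime) + j % 2 * first
-- ===== Notes on version B (the rewrite author's own statement) =====
-- stated objective: alternative
-- what changed: A walks the index with a while loop, an incremental accumulator and a big/small skip toggle; B computes the number of yielded terms in closed form with two floor divisions and emits each index directly from its position j as index0 + j//2*(2*prime) + j%2*first.
-- outside the precondition, e.g. on series_index(0, 4, 100): A raises ZeroDivisionError, B raises ZeroDivisionError; on series_index(-5, 30, 0): A returns [], B returns []; on series_index(-5, 0, 1000): A does not finish within the time limit, B returns []
import Mathlib
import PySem

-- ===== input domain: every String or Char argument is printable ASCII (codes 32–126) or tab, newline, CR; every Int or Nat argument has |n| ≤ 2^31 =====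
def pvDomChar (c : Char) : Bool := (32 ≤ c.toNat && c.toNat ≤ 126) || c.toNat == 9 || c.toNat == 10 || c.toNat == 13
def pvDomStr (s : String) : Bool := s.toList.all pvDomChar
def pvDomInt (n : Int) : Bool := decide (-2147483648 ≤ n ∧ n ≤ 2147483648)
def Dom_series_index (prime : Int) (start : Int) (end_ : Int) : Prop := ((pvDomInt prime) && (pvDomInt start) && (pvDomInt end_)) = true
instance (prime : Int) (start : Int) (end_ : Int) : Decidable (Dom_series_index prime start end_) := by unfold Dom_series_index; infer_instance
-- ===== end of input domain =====

-- B replaces A's incremental index accumulator and skip toggle by a closed-form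
-- term count (two floor divisions) and a direct per-position formula (objective: alternative).
-- A is a Python generator; both sides are compared as the list of yielded values.

-- ===== PORT A =====
-- A's while loop; the fuel (stop + 1 - index).toNat bounds the iteration count
-- (each step increases index by at least 1 on every input admitted by Pre_).
def seriesLoopA (big small stop : Int) : Nat → Int → Bool → List Int
  | 0, _, _ => []
  | fuel + 1, index, skip =>
    if index ≤ stop then
      index :: seriesLoopA big small stop fuel (index + (if skip then big else small)) (!skip)
    else []

def series_index (prime : Int) (start : Int) (end_ : Int) : List Int :=
  let start1 :=
    if start < prime ^ 2 then prime ^ 2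
    else
      let s0 := (PySem.Int.floordiv start prime + 1) * prime
      let s1 := if PySem.Int.mod s0 2 = 0 then s0 + prime else s0
      if PySem.Int.mod s1 3 = 0 then s1 + 2 * prime else s1
  let skip := decide (PySem.Int.mod (start1 + 2 * prime) 3 = 0)
  let e0 := PySem.Int.floordiv end_ prime * prime
  let e1 := if PySem.Int.mod e0 2 = 0 then e0 - prime else e0
  let e2 := if PySem.Int.mod e1 3 = 0 then e1 - 2 * prime else e1
  let big := prime + PySem.Int.floordiv (prime + 1) 6 * 2
  let small := prime - PySem.Int.floordiv (prime + 1) 6 * 2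
  let stop := PySem.Int.floordiv e2 2 - (PySem.Int.floordiv e2 3 - PySem.Int.floordiv e2 6) - 1
  let index := PySem.Int.floordiv start1 2 - (PySem.Int.floordiv start1 3 - PySem.Int.floordiv start1 6) - 1
  seriesLoopA big small stop (stop + 1 - index).toNat index skip

-- ===== PORT B =====
def series_index_alt (prime : Int) (start : Int) (end_ : Int) : List Int :=
  let start1 :=
    if start < prime ^ 2 then prime ^ 2
    else
      let s0 := (PySem.Int.floordiv start prime + 1) * prime
      let s1 := if PySem.Int.mod s0 2 = 0 then s0 + prime else s0
      if PySem.Int.mod s1 3 = 0 then s1 + 2 * prime else s1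
  let skip := decide (PySem.Int.mod (start1 + 2 * prime) 3 = 0)
  let e0 := PySem.Int.floordiv end_ prime * prime
  let e1 := if PySem.Int.mod e0 2 = 0 then e0 - prime else e0
  let e2 := if PySem.Int.mod e1 3 = 0 then e1 - 2 * prime else e1
  let g := PySem.Int.floordiv (prime + 1) 6 * 2
  let first := if skip then prime + g else prime - g
  let stop := PySem.Int.floordiv e2 2 - (PySem.Int.floordiv e2 3 - PySem.Int.floordiv e2 6) - 1
  let index0 := PySem.Int.floordiv start1 2 - (PySem.Int.floordiv start1 3 - PySem.Int.floordiv start1 6) - 1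
  if index0 > stop then []
  else
    let n0 := PySem.Int.floordiv (stop - index0) (2 * prime) + 1
    let n := if stop - index0 ≥ first then n0 + (PySem.Int.floordiv (stop - index0 - first) (2 * prime) + 1) else n0
    (PySem.List.pyRange 0 n 1).map
      (fun j => index0 + PySem.Int.floordiv j 2 * (2 * prime) + PySem.Int.mod j 2 * first)

-- ===== PRECONDITION & SPEC =====
-- Pre_ excludes prime ≤ 0: for prime = 0 the Python A raises ZeroDivisionError, and for
-- prime < 0 A's while loop never terminates whenever it is entered (the index increments
-- sum to 2*prime < 0 per pair of steps); on prime < 0 inputs where the loop is not entered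
-- A returns [] and B returns [] as well.
def Pre_series_index (prime : Int) (start : Int) (end_ : Int) : Prop := 1 ≤ prime
instance (prime : Int) (start : Int) (end_ : Int) : Decidable (Pre_series_index prime start end_) := by unfold Pre_series_index; infer_instance

def pvWitness_series_index : Int × Int × Int := (5, 0, 100)

def Spec_series_index (prime : Int) (start : Int) (end_ : Int) (out : List Int) : Prop := out = series_index_alt prime start end_
instance (prime : Int) (start : Int) (end_ : Int) (out : List Int) : Decidable (Spec_series_index prime start end_ out) := by unfold Spec_series_index; infer_instance

-- ===== CLAIM (what is proved, stated in full; the proofs are below) =====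
def Claim_equal_series_index : Prop := ∀ (prime : Int) (start : Int) (end_ : Int), Dom_series_index prime start end_ → Pre_series_index prime start end_ → Spec_series_index prime start end_ (series_index prime start end_)

-- ===== LEMMAS AND PROOFS =====

-- number of values yielded from index i with next increment f, period d
def cntIdx (stop i f d : Int) : Int :=
  PySem.Int.floordiv (stop - i) d + 1 +
    (if f ≤ stop - i then PySem.Int.floordiv (stop - i - f) d + 1 else 0)

-- the list B emits, parametrised by the current position and the next increment
def idxList (stop i f d : Int) : List Int :=
  if stop < i then []
  else (PySem.List.pyRange 0 (cntIdx stop i f d) 1).map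
    (fun j => i + PySem.Int.floordiv j 2 * d + PySem.Int.mod j 2 * f)

theorem idxList_cons (stop i f f' : Int) (hf : 1 ≤ f) (hf' : 1 ≤ f') (hle : i ≤ stop) :
    idxList stop i f (f + f') = i :: idxList stop (i + f) f' (f + f') := by
  have hd : (0:Int) < f + f' := by omega
  have h2 : (0:Int) < 2 := by norm_num
  simp only [idxList, cntIdx, PySem.Int.floordiv_eq_ediv_of_pos hd,
    PySem.Int.floordiv_eq_ediv_of_pos h2, PySem.Int.mod_eq_emod_of_pos h2,
    show ¬ stop < i by omega, if_false]
  by_cases hsf : f ≤ stop - i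
  · -- at least one further term: peel the head off B's range
    have hlt : ¬ stop < i + f := by omega
    have key : (stop - i) / (f + f') =
        (if f' ≤ stop - i - f then (stop - i - f - f') / (f + f') + 1 else 0) := by
      by_cases hdd : f' ≤ stop - i - f
      · rw [if_pos hdd, show stop - i - f - f' = stop - i - (f + f') by ring]
        conv_lhs => rw [show stop - i = (stop - i - (f + f')) + 1 * (f + f') by ring]
        rw [Int.add_mul_ediv_right _ _ (show (f + f') ≠ 0 by omega)]
      · rw [if_neg hdd]
        exact Int.ediv_eq_zero_of_lt (by omega) (by omega)
    rw [if_neg hlt, if_pos hsf, show stop - (i + f) = stop - i - f by ring, key]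
    set t := (if f' ≤ stop - i - f then (stop - i - f - f') / (f + f') + 1 else 0) with ht
    set m := (stop - i - f) / (f + f') with hm
    have hm0 : 0 ≤ m := Int.ediv_nonneg (by omega) (by omega)
    have ht0 : 0 ≤ t := by
      rw [ht]; split
      · have : 0 ≤ (stop - i - f - f') / (f + f') := Int.ediv_nonneg (by omega) (by omega)
        omega
      · omega
    rw [show t + 1 + (m + 1) = (m + 1 + t) + 1 by ring]
    rw [PySem.List.pyRange_one_cons (show (0:Int) < m + 1 + t + 1 by omega)]
    rw [List.map_cons]
    refine congrArg₂ _ (by norm_num) ?_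
    rw [show (0:Int) + 1 = 1 by norm_num]
    rw [PySem.List.pyRange_one 1 (m + 1 + t + 1), PySem.List.pyRange_one 0 (m + 1 + t)]
    rw [show m + 1 + t + 1 - 1 = m + 1 + t by ring, show m + 1 + t - 0 = m + 1 + t by ring]
    simp only [List.map_map]
    refine List.map_congr_left ?_
    intro k _
    simp only [Function.comp]
    have hk0 : (0:Int) ≤ (k : Int) := Int.natCast_nonneg k
    rcases Int.emod_two_eq (k : Int) with h | h
    · rw [show (1 + (k:Int)) / 2 = (k:Int) / 2 by omega,
        show (1 + (k:Int)) % 2 = 1 by omega,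
        show (0:Int) + (k:Int) = (k:Int) by ring, h]
      ring
    · rw [show (1 + (k:Int)) / 2 = (k:Int) / 2 + 1 by omega,
        show (1 + (k:Int)) % 2 = 0 by omega,
        show (0:Int) + (k:Int) = (k:Int) by ring, h]
      ring
  · -- the head is the only term
    have hq0 : (stop - i) / (f + f') = 0 := Int.ediv_eq_zero_of_lt (by omega) (by omega)
    rw [if_neg hsf, if_pos (show stop < i + f by omega), hq0]
    rw [show (0:Int) + 1 + 0 = 0 + 1 by ring]
    rw [PySem.List.pyRange_one_cons (show (0:Int) < 0 + 1 by omega)]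
    rw [PySem.List.pyRange_one_eq_nil (by omega)]
    simp

theorem seriesLoopA_eq_idxList (big small stop : Int) (hb : 1 ≤ big) (hs : 1 ≤ small) :
    ∀ (fuel : Nat) (i : Int) (skip : Bool), (stop + 1 - i).toNat ≤ fuel →
      seriesLoopA big small stop fuel i skip =
        idxList stop i (if skip then big else small) (big + small) := by
  intro fuel
  induction fuel with
  | zero =>
    intro i skip hfuel
    have : stop < i := by omega
    simp [seriesLoopA, idxList, this]
  | succ fuel ih =>
    intro i skip hfuel
    by_cases hle : i ≤ stop
    · have hF : (1:Int) ≤ (if skip then big else small) := by cases skip <;> simpa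
      have hF' : (1:Int) ≤ (if skip then small else big) := by cases skip <;> simpa
      have hrec := ih (i + (if skip then big else small)) (!skip) (by omega)
      simp only [seriesLoopA, hle, if_true]
      rw [hrec]
      cases skip with
      | false =>
        simpa [add_comm big small] using
          (idxList_cons stop i small big (by simpa using hF) (by simpa using hF') hle).symm
      | true =>
        simpa using (idxList_cons stop i big small (by simpa using hF) (by simpa using hF') hle).symm
    · simp [seriesLoopA, idxList, hle, show stop < i by omega]

theorem bridge_series (p ST I : Int) (skip : Bool) (hp : 1 ≤ p) :
    seriesLoopA (p + PySem.Int.floordiv (p + 1) 6 * 2) (p - PySem.Int.floordiv (p + 1) 6 * 2)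
        ST (ST + 1 - I).toNat I skip =
      if I > ST then []
      else
        (PySem.List.pyRange 0
            (if ST - I ≥ (if skip then p + PySem.Int.floordiv (p + 1) 6 * 2 else p - PySem.Int.floordiv (p + 1) 6 * 2) then
              PySem.Int.floordiv (ST - I) (2 * p) + 1 +
                (PySem.Int.floordiv (ST - I - (if skip then p + PySem.Int.floordiv (p + 1) 6 * 2 else p - PySem.Int.floordiv (p + 1) 6 * 2)) (2 * p) + 1)
            else PySem.Int.floordiv (ST - I) (2 * p) + 1) 1).map
          (fun j => I + PySem.Int.floordiv j 2 * (2 * p) +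
            PySem.Int.mod j 2 * (if skip then p + PySem.Int.floordiv (p + 1) 6 * 2 else p - PySem.Int.floordiv (p + 1) 6 * 2)) := by
  have h6 : (0:Int) < 6 := by norm_num
  have hq := Int.mul_ediv_add_emod (p + 1) 6
  have hr0 := Int.emod_nonneg (p + 1) (show (6:Int) ≠ 0 by norm_num)
  have hr1 := Int.emod_lt_of_pos (p + 1) h6
  have hg : 0 ≤ PySem.Int.floordiv (p + 1) 6 * 2 ∧ PySem.Int.floordiv (p + 1) 6 * 2 ≤ p - 1 := by
    rw [PySem.Int.floordiv_eq_ediv_of_pos h6]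
    omega
  have hb : (1:Int) ≤ p + PySem.Int.floordiv (p + 1) 6 * 2 := by omega
  have hs : (1:Int) ≤ p - PySem.Int.floordiv (p + 1) 6 * 2 := by omega
  rw [seriesLoopA_eq_idxList _ _ ST hb hs _ I skip le_rfl]
  unfold idxList cntIdx
  rw [show p + PySem.Int.floordiv (p + 1) 6 * 2 + (p - PySem.Int.floordiv (p + 1) 6 * 2) = 2 * p
    by ring]
  simp only [gt_iff_lt]
  set F := (if skip then p + PySem.Int.floordiv (p + 1) 6 * 2
    else p - PySem.Int.floordiv (p + 1) 6 * 2) with hF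
  have hcnt : PySem.Int.floordiv (ST - I) (2 * p) + 1 +
      (if F ≤ ST - I then PySem.Int.floordiv (ST - I - F) (2 * p) + 1 else 0) =
      (if ST - I ≥ F then
        PySem.Int.floordiv (ST - I) (2 * p) + 1 + (PySem.Int.floordiv (ST - I - F) (2 * p) + 1)
      else PySem.Int.floordiv (ST - I) (2 * p) + 1) := by
    simp only [ge_iff_le]
    split_ifs
    · rfl
    · ring
  rw [hcnt]

theorem series_index_spec : Claim_equal_series_index := by
  intro prime start end_ _ hp
  unfold Spec_series_index
  simp only [series_index, series_index_alt]
  exact bridge_series prime _ _ _ hp
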